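-- pv_equiv track=rewrite | github.com/slusted/aware | app/voc_themes.py | _coerce_sample_ids
-- ===== SOURCE A (Python) =====
-- def _coerce_sample_ids(raw) -> list[str]:
--     if not isinstance(raw, list):
--         return []
--     out = []
--     for v in raw:
--         try:
--             sid = str(v).strip()
--         except Exception:
--             continue
--         if sid and sid not in out:
--             out.append(sid)
--         if len(out) >= 10:
--             break
--     return out
-- ===== SOURCE B (Python) =====
-- def _coerce_sample_ids(raw) -> list[str]:
--     if not isinstance(raw, list):
--         return []
--     collected = []
--     for v in raw:
--         try:
--             sid = str(v).strip()
--         except Exception: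
--             continue
--         if sid:
--             collected.append(sid)
--     return list(dict.fromkeys(collected))[:10]
-- ===== Notes on version B (the rewrite author's own statement) =====
-- stated objective: simpler
-- what changed: Replaces A's single pass with an inline capped membership-checked accumulator (append-if-new, break at 10) by a gather pass collecting all non-empty stripped ids followed by an order-preserving dict.fromkeys dedup and a [:10] slice.
import Mathlib
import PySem

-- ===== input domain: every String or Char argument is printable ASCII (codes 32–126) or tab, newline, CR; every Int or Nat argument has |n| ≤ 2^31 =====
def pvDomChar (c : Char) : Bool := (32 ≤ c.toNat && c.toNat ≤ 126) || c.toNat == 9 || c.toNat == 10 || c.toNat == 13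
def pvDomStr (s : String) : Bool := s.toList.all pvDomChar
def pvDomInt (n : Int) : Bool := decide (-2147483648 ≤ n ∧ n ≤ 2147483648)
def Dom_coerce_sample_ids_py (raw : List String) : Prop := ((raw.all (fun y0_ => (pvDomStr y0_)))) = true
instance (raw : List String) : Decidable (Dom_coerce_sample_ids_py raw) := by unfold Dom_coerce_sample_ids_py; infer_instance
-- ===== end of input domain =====

-- B replaces A's capped membership-checked accumulator (append-if-new, break at 10) by a gather pass, an order-preserving dedup (dict.fromkeys) and a [:10] cap; objective: simpler.


-- ===== PORT A =====
-- A: one pass appending stripped non-empty unseen ids, breaking once 10 are collected.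
def coerceLoopA : List String → List String → List String
  | [], out => out
  | v :: rest, out =>
    let sid := PySem.Str.strip v
    let out' := if sid ≠ "" ∧ sid ∉ out then out ++ [sid] else out
    if 10 ≤ out'.length then out' else coerceLoopA rest out'

def coerce_sample_ids_py (raw : List String) : List String := coerceLoopA raw []

-- ===== PORT B =====
-- B: gather all non-empty stripped ids, then dict.fromkeys-style dedup and a [:10] cap.
def coerce_sample_ids_py_alt (raw : List String) : List String :=
  (PySem.List.dedup ((raw.map PySem.Str.strip).filter (fun s => s != ""))).take 10

-- ===== PRECONDITION & SPEC =====
def Spec_coerce_sample_ids_py (raw : List String) (out : List String) : Prop := out = coerce_sample_ids_py_alt raw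
instance (raw : List String) (out : List String) : Decidable (Spec_coerce_sample_ids_py raw out) := by unfold Spec_coerce_sample_ids_py; infer_instance

-- ===== CLAIM (what is proved, stated in full; the proofs are below) =====
def Claim_equal_coerce_sample_ids_py : Prop := ∀ (raw : List String), Dom_coerce_sample_ids_py raw → Spec_coerce_sample_ids_py raw (coerce_sample_ids_py raw)

-- ===== LEMMAS AND PROOFS =====

-- ===== VERDICT (by name: the statement is the Claim_ definition above) =====
-- the new (first-occurrence, not in `seen`) non-empty stripped ids of l
def newOnes (seen : List String) : List String → List String
  | [] => []
  | v :: rest =>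
    let s := PySem.Str.strip v
    if s ≠ "" ∧ s ∉ seen then s :: newOnes (seen ++ [s]) rest else newOnes seen rest

lemma newOnes_eq_foldl_add (l : List String) : ∀ (seen : List String),
    seen ++ newOnes seen l = ((l.map PySem.Str.strip).filter (fun s => s != "")).foldl PySem.Set.add seen := by
  induction l with
  | nil => intro seen; simp [newOnes]
  | cons v rest ih =>
    intro seen
    simp only [newOnes, List.map_cons, List.filter_cons]
    by_cases hs : PySem.Str.strip v = ""
    · simp [hs, ih]
    · by_cases hm : PySem.Str.strip v ∈ seen
      · simp [hs, hm, List.foldl_cons, ih]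
      · simp only [hs, hm, not_false_iff, and_true, if_pos, bne_iff_ne, ne_eq,
          List.foldl_cons, PySem.Set.add_of_not_mem hm]
        rw [← ih (seen ++ [PySem.Str.strip v])]
        simp

lemma loopA_eq (l : List String) : ∀ (out : List String), out.length < 10 →
    coerceLoopA l out = (out ++ newOnes out l).take 10 := by
  induction l with
  | nil =>
    intro out h
    simp [coerceLoopA, newOnes, List.take_of_length_le (Nat.le_of_lt h)]
  | cons v rest ih =>
    intro out h
    by_cases h1 : PySem.Str.strip v = ""
    · simp only [coerceLoopA, newOnes, h1, ne_eq, not_true_eq_false, false_and,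
        Nat.not_le.mpr h, if_false]
      exact ih out h
    · by_cases h2 : PySem.Str.strip v ∈ out
      · simp only [coerceLoopA, newOnes, ne_eq, h1, not_false_eq_true, h2, not_true_eq_false,
          and_false, if_neg, Nat.not_le.mpr h]
        exact ih out h
      · have hcond : PySem.Str.strip v ≠ "" ∧ PySem.Str.strip v ∉ out := ⟨h1, h2⟩
        simp only [coerceLoopA, newOnes, if_pos hcond]
        by_cases hb : 10 ≤ (out ++ [PySem.Str.strip v]).length
        · have hlen : (out ++ [PySem.Str.strip v]).length = 10 := by
            simp at hb ⊢; omega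
          rw [if_pos hb, show out ++ PySem.Str.strip v :: newOnes (out ++ [PySem.Str.strip v]) rest
              = (out ++ [PySem.Str.strip v]) ++ newOnes (out ++ [PySem.Str.strip v]) rest by simp,
            List.take_left' hlen]
        · rw [if_neg hb, ih _ (Nat.not_le.mp hb)]
          simp

-- ===== VERDICT (by name: the statement is the Claim_ definition above) =====
theorem coerce_sample_ids_py_spec : Claim_equal_coerce_sample_ids_py := by
  intro raw _
  unfold Spec_coerce_sample_ids_py coerce_sample_ids_py coerce_sample_ids_py_alt
  rw [loopA_eq raw [] (by simp), PySem.List.dedup_eq_ofList, PySem.Set.ofList_eq_foldl,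
    ← newOnes_eq_foldl_add]
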